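-- pv_equiv track=rewrite | github.com/cyprienruffino/anki-thesession | irish_anki.py | format_key
-- ===== SOURCE A (Python) =====
-- def format_key(key: str) -> str:
--     """Format the key for display (e.g., 'Dmaj' -> 'D major')."""
--     key_mapping = {
--         'maj': ' major',
--         'min': ' minor',
--         'dor': ' dorian',
--         'mix': ' mixolydian',
--         'aeo': ' aeolian',
--         'ion': ' ionian',
--         'phr': ' phrygian',
--         'loc': ' locrian',
--         'lyd': ' lydian'
--     }
--
--     for abbrev, full in key_mapping.items():
--         if key.lower().endswith(abbrev):
--             root = key[:-len(abbrev)]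
--             return root + full
--
--     return key
-- ===== SOURCE B (Python) =====
-- def format_key(key: str) -> str:
--     """Format the key for display (e.g., 'Dmaj' -> 'D major')."""
--     key_mapping = {
--         'maj': ' major',
--         'min': ' minor',
--         'dor': ' dorian',
--         'mix': ' mixolydian',
--         'aeo': ' aeolian',
--         'ion': ' ionian',
--         'phr': ' phrygian',
--         'loc': ' locrian',
--         'lyd': ' lydian'
--     }
--     suffix = key[-3:].lower()
--     if suffix in key_mapping:
--         return key[:-3] + key_mapping[suffix]
--     return key
-- ===== Notes on version B (the rewrite author's own statement) =====
-- stated objective: idiomatic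
-- what changed: B replaces A's linear scan over the mapping's items with per-item lower().endswith checks by computing the lowercased 3-character suffix once and doing a single direct dictionary lookup (all abbreviations are exactly 3 characters long).
import Mathlib
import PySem

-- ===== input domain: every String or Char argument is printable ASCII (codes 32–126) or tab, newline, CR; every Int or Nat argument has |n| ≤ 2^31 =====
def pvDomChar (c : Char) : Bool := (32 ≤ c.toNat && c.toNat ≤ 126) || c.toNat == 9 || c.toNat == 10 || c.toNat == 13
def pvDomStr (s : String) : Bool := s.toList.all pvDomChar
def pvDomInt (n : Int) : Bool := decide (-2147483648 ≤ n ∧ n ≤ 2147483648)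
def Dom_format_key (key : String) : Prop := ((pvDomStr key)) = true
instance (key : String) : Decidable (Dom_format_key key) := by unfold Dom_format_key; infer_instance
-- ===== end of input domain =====

-- B replaces A's scan over the mapping's items (an endswith test per entry) by one direct
-- dictionary lookup of the lowercased 3-character suffix (idiomatic; all abbreviations have length 3).

-- ===== PORT A =====
-- the dict literal built in A (shared literal; both Pythons build the identical dict literal)
def pvKeyMapping : PySem.Dict String String :=
  PySem.Dict.ofList
    [ ("maj", " major"), ("min", " minor"), ("dor", " dorian"), ("mix", " mixolydian")
    , ("aeo", " aeolian"), ("ion", " ionian"), ("phr", " phrygian"), ("loc", " locrian")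
    , ("lyd", " lydian") ]

-- A's for-loop over key_mapping.items() with early return
def formatKeyLoop (key : String) : List (String × String) → String
  | [] => key
  | (abbr, full) :: rest =>
    if PySem.Str.endswith (PySem.Str.lower key) abbr then
      -- root = key[:-len(abbrev)] (abbrev renamed: Lean keyword); return root + full
      String.ofList (PySem.Chars.slice key.toList none (some (-(PySem.Str.len abbr))) ++ full.toList)
    else formatKeyLoop key rest

def format_key (key : String) : String :=
  formatKeyLoop key pvKeyMapping.items

-- ===== PORT B =====
def format_key_alt (key : String) : String :=
  -- suffix = key[-3:].lower()
  let suffix := PySem.Str.lower (PySem.Str.slice key (some (-3)) none)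
  if pvKeyMapping.contains suffix then
    -- key[:-3] + key_mapping[suffix]
    String.ofList (PySem.Chars.slice key.toList none (some (-3)) ++ (pvKeyMapping.getD suffix "").toList)
  else key

-- ===== PRECONDITION & SPEC =====
def Spec_format_key (key : String) (out : String) : Prop := out = format_key_alt key
instance (key : String) (out : String) : Decidable (Spec_format_key key out) := by unfold Spec_format_key; infer_instance

-- ===== CLAIM (what is proved, stated in full; the proofs are below) =====
def Claim_equal_format_key : Prop := ∀ (key : String), Dom_format_key key → Spec_format_key key (format_key key)

-- ===== LEMMAS AND PROOFS =====

-- key.lower() ends with a 3-character p iff the lowercased last-3-character slice equals p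
theorem ends3 (cs p : List Char) (hp : p.length = 3) :
    PySem.Chars.endswith (PySem.Chars.lower cs) p
      = (PySem.Chars.lower (cs.drop (cs.length - 3)) == p) := by
  rw [Bool.eq_iff_iff, PySem.Chars.endswith_iff, beq_iff_eq, List.suffix_iff_eq_drop]
  simp only [PySem.Chars.lower, List.length_map, hp, List.map_drop]
  exact eq_comm

-- the lowercased suffix string of B, as a char list
theorem suffix_toList (key : String) :
    (PySem.Str.lower (PySem.Str.slice key (some (-3)) none)).toList
      = PySem.Chars.lower (key.toList.drop (key.toList.length - 3)) := by
  simp [pysem]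

theorem format_key_eq (key : String) : format_key key = format_key_alt key := by
  unfold format_key format_key_alt
  have hitems : pvKeyMapping.items =
    [ ("maj", " major"), ("min", " minor"), ("dor", " dorian"), ("mix", " mixolydian")
    , ("aeo", " aeolian"), ("ion", " ionian"), ("phr", " phrygian"), ("loc", " locrian")
    , ("lyd", " lydian") ] := rfl
  rw [hitems]
  simp only [formatKeyLoop]
  have hsuf := suffix_toList key
  set suffix := PySem.Str.lower (PySem.Str.slice key (some (-3)) none) with hsufdef
  have hcond : ∀ p : String, p.toList.length = 3 →
      PySem.Str.endswith (PySem.Str.lower key) p = (suffix == p) := by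
    intro p hp
    have := ends3 key.toList p.toList hp
    simp only [PySem.Str.endswith, PySem.Str.lower] at *
    rw [String.toList_ofList] at *
    rw [this, ← hsuf]
    rw [Bool.eq_iff_iff, beq_iff_eq, beq_iff_eq]
    constructor
    · intro h; exact String.toList_inj.mp h
    · intro h; rw [h]
  rw [hcond "maj" rfl, hcond "min" rfl, hcond "dor" rfl, hcond "mix" rfl, hcond "aeo" rfl, hcond "ion" rfl, hcond "phr" rfl, hcond "loc" rfl, hcond "lyd" rfl]
  by_cases h0 : suffix = "maj"
  · simp [h0, show pvKeyMapping.contains "maj" = true from rfl, show pvKeyMapping.getD "maj" "" = " major" from rfl]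
  by_cases h1 : suffix = "min"
  · simp [h1, show pvKeyMapping.contains "min" = true from rfl, show pvKeyMapping.getD "min" "" = " minor" from rfl]
  by_cases h2 : suffix = "dor"
  · simp [h2, show pvKeyMapping.contains "dor" = true from rfl, show pvKeyMapping.getD "dor" "" = " dorian" from rfl]
  by_cases h3 : suffix = "mix"
  · simp [h3, show pvKeyMapping.contains "mix" = true from rfl, show pvKeyMapping.getD "mix" "" = " mixolydian" from rfl]
  by_cases h4 : suffix = "aeo"
  · simp [h4, show pvKeyMapping.contains "aeo" = true from rfl, show pvKeyMapping.getD "aeo" "" = " aeolian" from rfl]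
  by_cases h5 : suffix = "ion"
  · simp [h5, show pvKeyMapping.contains "ion" = true from rfl, show pvKeyMapping.getD "ion" "" = " ionian" from rfl]
  by_cases h6 : suffix = "phr"
  · simp [h6, show pvKeyMapping.contains "phr" = true from rfl, show pvKeyMapping.getD "phr" "" = " phrygian" from rfl]
  by_cases h7 : suffix = "loc"
  · simp [h7, show pvKeyMapping.contains "loc" = true from rfl, show pvKeyMapping.getD "loc" "" = " locrian" from rfl]
  by_cases h8 : suffix = "lyd"
  · simp [h8, show pvKeyMapping.contains "lyd" = true from rfl, show pvKeyMapping.getD "lyd" "" = " lydian" from rfl]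
  simp [h0, h1, h2, h3, h4, h5, h6, h7, h8, PySem.Dict.contains_eq_decide_mem_keys, show pvKeyMapping.keys = ["maj", "min", "dor", "mix", "aeo", "ion", "phr", "loc", "lyd"] from rfl]

-- ===== VERDICT (by name: the statement is the Claim_ definition above) =====
theorem format_key_spec : Claim_equal_format_key := by
  intro key _
  unfold Spec_format_key
  exact format_key_eq key
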